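-- pv_equiv track=rewrite | github.com/YunTang1997/My_projects | 编程题/1300. 转变数组后最接近目标值的数组和.py | findBestValue_1
-- ===== SOURCE A (Python) =====
-- def findBestValue_1(arr, target):
--     max_value = max(arr)
--     res, tmp_abs = 0, target
--     for i in range(1, max_value + 1):
--         cur_list = []
--         for j in arr:
--             cur_list.append(min(i, j))
--             cur_abs = abs(sum(cur_list) - target)
--         if cur_abs < tmp_abs:
--             res = i
--             tmp_abs = cur_abs
--     return res
-- ===== SOURCE B (Python) =====
-- def findBestValue_1(arr, target):
--     s = sorted(arr)
--     n = len(s)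
--     prefix = [0]
--     acc = 0
--     for x in s:
--         acc += x
--         prefix.append(acc)
--     res, best = 0, target
--     for i in range(1, s[n - 1] + 1):
--         # k = number of elements <= i, by binary search on the sorted list
--         lo, hi = 0, n
--         while lo < hi:
--             mid = (lo + hi) // 2
--             if s[mid] <= i:
--                 lo = mid + 1
--             else:
--                 hi = mid
--         cur = abs(prefix[lo] + i * (n - lo) - target)
--         if cur < best:
--             res, best = i, cur
--     return res
-- ===== Notes on version B (the rewrite author's own statement) =====
-- stated objective: faster
-- what changed: A rebuilds the capped list element by element and re-sums it after every append for each candidate cap; B sorts once, builds prefix sums, and evaluates each candidate's capped sum in O(log n) with a binary search over the sorted array.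
-- outside the precondition, e.g. on findBestValue_1([], 5): A raises ValueError, B raises IndexError
import Mathlib
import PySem

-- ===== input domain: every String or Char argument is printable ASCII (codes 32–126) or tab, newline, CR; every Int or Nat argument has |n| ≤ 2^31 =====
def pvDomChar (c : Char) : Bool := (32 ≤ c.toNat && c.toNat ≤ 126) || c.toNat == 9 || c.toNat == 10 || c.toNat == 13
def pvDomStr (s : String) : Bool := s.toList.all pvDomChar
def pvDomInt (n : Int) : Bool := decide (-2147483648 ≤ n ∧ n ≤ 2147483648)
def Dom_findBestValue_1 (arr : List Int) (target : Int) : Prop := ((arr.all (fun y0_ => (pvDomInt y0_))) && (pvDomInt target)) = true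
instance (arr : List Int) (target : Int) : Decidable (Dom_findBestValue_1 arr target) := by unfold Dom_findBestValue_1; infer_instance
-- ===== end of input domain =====

-- B replaces A's per-candidate rebuild of the capped list (with a re-summation after every
-- element) by sort + prefix sums + a binary search per candidate; same result, fewer passes.

-- ===== PORT A =====
def findBestValue_1 (arr : List Int) (target : Int) : Int :=
  -- max(arr); arr ≠ [] is Pre_, so the .getD 0 default is never used
  let max_value := (PySem.List.max? arr (fun x => x)).getD 0
  let st := (PySem.List.pyRange 1 (max_value + 1) 1).foldl (fun (st : Int × Int) i =>
      -- inner loop: cur_list grows, cur_abs recomputed after every append (dummy init 0,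
      -- overwritten since arr ≠ [])
      let inner := arr.foldl (fun (p : List Int × Int) j =>
          let cl := p.1 ++ [min i j]
          (cl, |cl.sum - target|)) ([], 0)
      if inner.2 < st.2 then (i, inner.2) else st) (0, target)
  st.1

-- ===== PORT B =====
-- the hand-written while-loop binary search of Source B (lo, hi over indices); s[mid] is in
-- range whenever lo < hi ≤ s.length, so the .getD 0 default is never used
-- the while loop runs while lo < hi; each step shrinks hi - lo, so hi - lo steps of fuel
-- always suffice and the 0-fuel branch is never the exit on a reachable state
def pvBisectGo (s : List Int) (i : Int) : Nat → Nat → Nat → Nat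
  | 0, lo, _hi => lo
  | fuel + 1, lo, hi =>
    if lo < hi then
      if s.getD ((lo + hi) / 2) 0 ≤ i then pvBisectGo s i fuel ((lo + hi) / 2 + 1) hi
      else pvBisectGo s i fuel lo ((lo + hi) / 2)
    else lo

def pvBisect (s : List Int) (i : Int) (lo hi : Nat) : Nat :=
  pvBisectGo s i (hi - lo) lo hi

def findBestValue_1_alt (arr : List Int) (target : Int) : Int :=
  let s := PySem.List.sorted arr (fun x => x) false
  let n := s.length
  -- prefix-sum list: state (prefix, acc); prefix[k] = sum of the k smallest elements
  let pr := s.foldl (fun (p : List Int × Int) x => (p.1 ++ [p.2 + x], p.2 + x)) ([(0 : Int)], 0)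
  -- s[n-1]: arr ≠ [] is Pre_, so the .getD 0 default is never used
  let st := (PySem.List.pyRange 1 (s.getD (n - 1) 0 + 1) 1).foldl (fun (st : Int × Int) i =>
      let lo := pvBisect s i 0 n
      -- prefix[lo]: 0 ≤ lo ≤ n < len(prefix), so the .getD 0 default is never used
      let cur := |pr.1.getD lo 0 + i * ((n : Int) - (lo : Int)) - target|
      if cur < st.2 then (i, cur) else st) (0, target)
  st.1

-- ===== PRECONDITION & SPEC =====
-- Pre_ excludes only the empty list, on which Python A raises ValueError (max of empty arg).
def Pre_findBestValue_1 (arr : List Int) (target : Int) : Prop := arr ≠ []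
instance (arr : List Int) (target : Int) : Decidable (Pre_findBestValue_1 arr target) := by
  unfold Pre_findBestValue_1; infer_instance

def pvWitness_findBestValue_1 : List Int × Int := ([4, 9, 3], 10)

def Spec_findBestValue_1 (arr : List Int) (target : Int) (out : Int) : Prop := out = findBestValue_1_alt arr target
instance (arr : List Int) (target : Int) (out : Int) : Decidable (Spec_findBestValue_1 arr target out) := by unfold Spec_findBestValue_1; infer_instance

-- ===== CLAIM (what is proved, stated in full; the proofs are below) =====
def Claim_equal_findBestValue_1 : Prop := ∀ (arr : List Int) (target : Int), Dom_findBestValue_1 arr target → Pre_findBestValue_1 arr target → Spec_findBestValue_1 arr target (findBestValue_1 arr target)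

-- ===== LEMMAS AND PROOFS =====

-- A's inner loop: the final second component is |sum of the capped list - target| (arr ≠ []).
theorem pv_innerA (i target : Int) :
    ∀ (arr l0 : List Int) (c0 : Int), arr ≠ [] →
      (arr.foldl (fun (p : List Int × Int) j =>
          let cl := p.1 ++ [min i j]
          (cl, |cl.sum - target|)) (l0, c0)).2
        = |(l0 ++ arr.map (fun j => min i j)).sum - target| := by
  intro arr
  induction arr with
  | nil => intro l0 c0 h; exact absurd rfl h
  | cons j rest ih =>
    intro l0 c0 _
    by_cases hr : rest = []
    · subst hr; simp
    · simp only [List.foldl_cons]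
      rw [ih _ _ hr]
      simp [List.append_assoc]

-- B's prefix fold, structurally.
theorem pv_prefixFold :
    ∀ (s l0 : List Int) (a0 : Int),
      (s.foldl (fun (p : List Int × Int) x => (p.1 ++ [p.2 + x], p.2 + x)) (l0, a0)).1
        = l0 ++ (List.range s.length).map (fun t => a0 + (s.take (t + 1)).sum) := by
  intro s
  induction s with
  | nil => intro l0 a0; simp
  | cons x rest ih =>
    intro l0 a0
    simp only [List.foldl_cons]
    rw [ih]
    simp [List.range_succ_eq_map, List.map_map, Function.comp, add_assoc]

theorem pv_prefix_getD (s : List Int) (k : Nat) (hk : k ≤ s.length) :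
    ((s.foldl (fun (p : List Int × Int) x => (p.1 ++ [p.2 + x], p.2 + x)) ([(0:Int)], 0)).1).getD k 0
      = (s.take k).sum := by
  rw [pv_prefixFold]
  cases k with
  | zero => simp
  | succ t =>
    have ht : t < s.length := by omega
    have hlen : t < ((List.range s.length).map (fun t => (0:Int) + (s.take (t + 1)).sum)).length := by
      simpa using ht
    simp only [List.singleton_append, List.getD_cons_succ]
    rw [List.getD_eq_getElem _ _ hlen]
    simp

-- indices of a ≤-sorted list whose entry is ≤ i are exactly those below the takeWhile length
theorem pv_pw_le_iff (s : List Int) (hpw : s.Pairwise (· ≤ ·)) (i : Int) (idx : Nat)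
    (h : idx < s.length) :
    (s[idx] ≤ i ↔ idx < (s.takeWhile (fun x => decide (x ≤ i))).length) := by
  have hkn : (s.takeWhile (fun x => decide (x ≤ i))).length ≤ s.length :=
    (List.takeWhile_sublist _).length_le
  have hpwg := List.pairwise_iff_getElem.1 hpw
  constructor
  · intro hle
    by_contra hnot
    have hkidx : (s.takeWhile (fun x => decide (x ≤ i))).length ≤ idx := by omega
    have hkn' : (s.takeWhile (fun x => decide (x ≤ i))).length < s.length :=
      lt_of_le_of_lt hkidx h
    have htake : s.takeWhile (fun x => decide (x ≤ i))
        = s.take (s.takeWhile (fun x => decide (x ≤ i))).length :=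
      List.prefix_iff_eq_take.1 (List.takeWhile_prefix _)
    have hdwEq : s.dropWhile (fun x => decide (x ≤ i))
        = s.drop (s.takeWhile (fun x => decide (x ≤ i))).length := by
      have h1 : s.takeWhile (fun x => decide (x ≤ i)) ++ s.dropWhile (fun x => decide (x ≤ i)) = s :=
        List.takeWhile_append_dropWhile
      have h2 : s.take (s.takeWhile (fun x => decide (x ≤ i))).length
          ++ s.drop (s.takeWhile (fun x => decide (x ≤ i))).length = s :=
        List.take_append_drop _ s
      rw [htake] at h1
      exact List.append_cancel_left (h1.trans h2.symm)
    have hne : s.dropWhile (fun x => decide (x ≤ i)) ≠ [] := by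
      rw [hdwEq]; intro hc; rw [List.drop_eq_nil_iff] at hc; omega
    have hhead := List.head_dropWhile_not (fun x => decide (x ≤ i)) hne
    have he : (s.dropWhile (fun x => decide (x ≤ i))).head hne
        = s[(s.takeWhile (fun x => decide (x ≤ i))).length]'hkn' := by
      rw [List.head_eq_getElem]
      rw [List.getElem_of_eq hdwEq]
      simp [List.getElem_drop]
    rw [he] at hhead
    have hmono : s[(s.takeWhile (fun x => decide (x ≤ i))).length]'hkn' ≤ s[idx] := by
      rcases Nat.eq_or_lt_of_le hkidx with heq | hlt
      · exact le_of_eq (by simp only [heq])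
      · exact hpwg _ _ hkn' h hlt
    simp at hhead
    omega
  · intro hlt
    have heq : (s.takeWhile (fun x => decide (x ≤ i)))[idx]'hlt = s[idx] :=
      List.IsPrefix.getElem (List.takeWhile_prefix _) hlt
    have hmem : (s.takeWhile (fun x => decide (x ≤ i)))[idx]'hlt
        ∈ s.takeWhile (fun x => decide (x ≤ i)) := List.getElem_mem _
    have := List.mem_takeWhile_imp hmem
    rw [heq] at this
    simpa using this

theorem pv_bisect_eq (s : List Int) (hpw : s.Pairwise (· ≤ ·)) (i : Int) :
    pvBisect s i 0 s.length = (s.takeWhile (fun x => decide (x ≤ i))).length := by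
  have hkn : (s.takeWhile (fun x => decide (x ≤ i))).length ≤ s.length :=
    (List.takeWhile_sublist _).length_le
  suffices H : ∀ fuel lo hi, hi - lo ≤ fuel →
      lo ≤ (s.takeWhile (fun x => decide (x ≤ i))).length →
      (s.takeWhile (fun x => decide (x ≤ i))).length ≤ hi → hi ≤ s.length →
      pvBisectGo s i fuel lo hi = (s.takeWhile (fun x => decide (x ≤ i))).length by
    exact H (s.length - 0) 0 s.length (by omega) (by omega) hkn (by omega)
  intro fuel
  induction fuel with
  | zero =>
    intro lo hi h1 h2 h3 h4
    simp only [pvBisectGo]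
    omega
  | succ d ih =>
    intro lo hi h1 h2 h3 h4
    by_cases hlh : lo < hi
    · rw [pvBisectGo, if_pos hlh]
      have hmid2 : (lo + hi) / 2 < hi := by omega
      have hmn : (lo + hi) / 2 < s.length := by omega
      have hg : s.getD ((lo + hi) / 2) 0 = s[(lo + hi) / 2] := List.getD_eq_getElem s 0 hmn
      by_cases htest : s.getD ((lo + hi) / 2) 0 ≤ i
      · rw [if_pos htest]
        have hc : (lo + hi) / 2 < (s.takeWhile (fun x => decide (x ≤ i))).length :=
          (pv_pw_le_iff s hpw i _ hmn).1 (hg ▸ htest)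
        exact ih ((lo + hi) / 2 + 1) hi (by omega) (by omega) h3 h4
      · rw [if_neg htest]
        have hc : ¬ (lo + hi) / 2 < (s.takeWhile (fun x => decide (x ≤ i))).length := by
          intro hc
          exact htest (hg ▸ ((pv_pw_le_iff s hpw i _ hmn).2 hc))
        exact ih lo ((lo + hi) / 2) (by omega) h2 (by omega) (by omega)
    · rw [pvBisectGo, if_neg hlh]
      omega

-- sum of the capped list, via the split of the sorted list at the threshold
theorem pv_capped_sum (s : List Int) (hpw : s.Pairwise (· ≤ ·)) (i : Int) :
    (s.take (s.takeWhile (fun x => decide (x ≤ i))).length).sum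
      + i * ((s.length : Int) - ((s.takeWhile (fun x => decide (x ≤ i))).length : Int))
      = (s.map (fun j => min i j)).sum := by
  have hkn : (s.takeWhile (fun x => decide (x ≤ i))).length ≤ s.length :=
    (List.takeWhile_sublist _).length_le
  have htake : s.takeWhile (fun x => decide (x ≤ i))
      = s.take (s.takeWhile (fun x => decide (x ≤ i))).length :=
    List.prefix_iff_eq_take.1 (List.takeWhile_prefix _)
  conv_rhs => rw [← List.take_append_drop (s.takeWhile (fun x => decide (x ≤ i))).length s]
  rw [List.map_append, List.sum_append]
  have hlow : (s.take (s.takeWhile (fun x => decide (x ≤ i))).length).map (fun j => min i j)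
      = s.take (s.takeWhile (fun x => decide (x ≤ i))).length := by
    refine (List.map_congr_left ?_).trans (List.map_id _)
    intro x hx
    rw [← htake] at hx
    have := List.mem_takeWhile_imp hx
    simp at this
    exact min_eq_right this
  have hhigh : (s.drop (s.takeWhile (fun x => decide (x ≤ i))).length).map (fun j => min i j)
      = (s.drop (s.takeWhile (fun x => decide (x ≤ i))).length).map (fun _ => i) := by
    apply List.map_congr_left
    intro x hx
    rw [List.mem_iff_getElem] at hx
    obtain ⟨t, htl, hxe⟩ := hx
    have hlt : (s.takeWhile (fun x => decide (x ≤ i))).length + t < s.length := by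
      simp [List.length_drop] at htl; omega
    have hge : (s.drop (s.takeWhile (fun x => decide (x ≤ i))).length)[t]'htl
        = s[(s.takeWhile (fun x => decide (x ≤ i))).length + t]'hlt := List.getElem_drop
    have hnot : ¬ (s[(s.takeWhile (fun x => decide (x ≤ i))).length + t]'hlt ≤ i) := by
      intro hc
      have := (pv_pw_le_iff s hpw i _ hlt).1 hc
      omega
    rw [← hxe, hge]
    exact min_eq_left (by omega)
  rw [hlow, hhigh, PySem.List.sum_map_const_int]
  simp only [List.length_drop]
  push_cast [hkn]
  ring

-- max(arr) is the last entry of the sorted list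
theorem pv_max_eq (arr s : List Int) (hperm : s.Perm arr) (hpw : s.Pairwise (· ≤ ·))
    (h : arr ≠ []) :
    (PySem.List.max? arr (fun x => x)).getD 0 = s.getD (s.length - 1) 0 := by
  have hsne : s ≠ [] := by
    intro hc; subst hc; exact h hperm.symm.eq_nil
  have hn : 0 < s.length := List.length_pos_of_ne_nil hsne
  cases hm : PySem.List.max? arr (fun x => x) with
  | none => exact absurd ((PySem.List.max?_eq_none_iff arr (fun x => x)).1 hm) h
  | some m =>
    have hmem : m ∈ arr := PySem.List.max?_mem hm
    have hmax : ∀ y ∈ arr, y ≤ m := fun y hy => PySem.List.max?_isMax hm y hy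
    rw [List.getD_eq_getElem s 0 (by omega)]
    simp only [Option.getD_some]
    have hpwg := List.pairwise_iff_getElem.1 hpw
    apply le_antisymm
    · have hmem' : m ∈ s := hperm.mem_iff.2 hmem
      rw [List.mem_iff_getElem] at hmem'
      obtain ⟨p, hp, hpe⟩ := hmem'
      rw [← hpe]
      rcases Nat.lt_or_ge p (s.length - 1) with hlt | hge
      · exact hpwg _ _ hp (by omega) hlt
      · have hpe2 : p = s.length - 1 := by omega
        subst hpe2
        exact le_refl _
    · exact hmax _ (hperm.mem_iff.1 (List.getElem_mem (by omega)))

-- ===== VERDICT (by name: the statement is the Claim_ definition above) =====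
theorem findBestValue_1_spec : Claim_equal_findBestValue_1 := by
  intro arr target _ hpre
  unfold Spec_findBestValue_1
  simp only [findBestValue_1, findBestValue_1_alt]
  have hpw : (PySem.List.sorted arr (fun x => x) false).Pairwise (· ≤ ·) := by
    have := PySem.List.sorted_pairwise arr (fun x => x)
    simpa using this
  rw [pv_max_eq arr (PySem.List.sorted arr (fun x => x) false)
      (PySem.List.sorted_perm arr (fun x => x) false) hpw hpre]
  refine congrArg Prod.fst ?_
  apply PySem.List.foldl_congr_mem
  intro st i _
  have hinner := pv_innerA i target arr [] 0 hpre
  simp only [List.nil_append] at hinner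
  rw [hinner]
  rw [pv_bisect_eq (PySem.List.sorted arr (fun x => x) false) hpw i]
  rw [pv_prefix_getD _ _ ((List.takeWhile_sublist _).length_le)]
  rw [pv_capped_sum (PySem.List.sorted arr (fun x => x) false) hpw i]
  rw [List.Perm.sum_eq (List.Perm.map _ (PySem.List.sorted_perm arr (fun x => x) false))]
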